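-- pv_equiv track=rewrite | github.com/politeauthority/ChatSec | app/main/chat_filters.py | user_mentions
-- ===== SOURCE A (Python) =====
-- def user_mentions(msg, users=None):
--     users = ['alix', 'brian', 'evan']
--     for u in users:
--         mention_str = '@%s ' % u
--         if mention_str in msg:
--             replace_str = """<span class="chat_mention">%s</span>""" % mention_str
--             msg = msg.replace(mention_str, replace_str)
--     return msg
-- ===== SOURCE B (Python) =====
-- def user_mentions(msg, users=None):
--     # Single left-to-right scan replacing any mention token where it occurs,
--     # instead of three separate str.replace passes.
--     tokens = ('@alix ', '@brian ', '@evan ')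
--     out = []
--     i = 0
--     n = len(msg)
--     while i < n:
--         for t in tokens:
--             if msg.startswith(t, i):
--                 out.append('<span class="chat_mention">%s</span>' % t)
--                 i += len(t)
--                 break
--         else:
--             out.append(msg[i])
--             i += 1
--     return ''.join(out)
-- ===== Notes on version B (the rewrite author's own statement) =====
-- stated objective: alternative
-- what changed: B replaces A's three sequential whole-string str.replace passes (one per mention token) by a single left-to-right scan that matches any of the three tokens at each position and wraps it in place.
import Mathlib
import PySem

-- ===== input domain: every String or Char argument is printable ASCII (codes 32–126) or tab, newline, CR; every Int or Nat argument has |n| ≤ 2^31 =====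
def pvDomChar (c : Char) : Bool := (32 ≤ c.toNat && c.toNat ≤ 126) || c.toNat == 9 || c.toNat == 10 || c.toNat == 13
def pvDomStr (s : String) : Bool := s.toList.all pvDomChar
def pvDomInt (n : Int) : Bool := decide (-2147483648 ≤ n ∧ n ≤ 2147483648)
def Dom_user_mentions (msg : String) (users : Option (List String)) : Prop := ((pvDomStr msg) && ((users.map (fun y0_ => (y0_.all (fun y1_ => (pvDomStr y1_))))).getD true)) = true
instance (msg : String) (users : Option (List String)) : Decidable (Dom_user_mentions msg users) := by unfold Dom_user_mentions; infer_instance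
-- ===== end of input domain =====

-- B makes one left-to-right scan matching any of the three mention tokens instead of A's
-- three whole-string replace passes; same return value (alternative decomposition, no speed claim).

-- ===== PORT A =====
-- A: for each hard-coded user, if '@user ' occurs in msg, replace every occurrence
-- by the span-wrapped token; the 'users' parameter is overwritten and ignored.
def user_mentions (msg : String) (_users : Option (List String)) : String :=
  let usersList := ["alix", "brian", "evan"]
  String.ofList (usersList.foldl (fun m u =>
    let mentionStr := "@".toList ++ u.toList ++ " ".toList        -- '@%s ' % u
    if PySem.Chars.isIn mentionStr m then
      let replaceStr := "<span class=\"chat_mention\">".toList ++ mentionStr ++ "</span>".toList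
      PySem.Chars.replace m mentionStr replaceStr
    else m) msg.toList)

-- ===== PORT B =====
-- '<span class="chat_mention">%s</span>' % t
def pvWrapTok (t : List Char) : List Char :=
  "<span class=\"chat_mention\">".toList ++ t ++ "</span>".toList

-- B's while-loop over positions, as structural recursion on the character list.
def pvScan : List Char → List Char
  | [] => []
  | c :: cs =>
    if List.isPrefixOf "@alix ".toList (c :: cs) then
      pvWrapTok "@alix ".toList ++ pvScan (cs.drop 5)
    else if List.isPrefixOf "@brian ".toList (c :: cs) then
      pvWrapTok "@brian ".toList ++ pvScan (cs.drop 6)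
    else if List.isPrefixOf "@evan ".toList (c :: cs) then
      pvWrapTok "@evan ".toList ++ pvScan (cs.drop 5)
    else c :: pvScan cs
termination_by l => l.length
decreasing_by all_goals (simp; try omega)

def user_mentions_alt (msg : String) (_users : Option (List String)) : String :=
  String.ofList (pvScan msg.toList)

-- ===== PRECONDITION & SPEC =====
def Spec_user_mentions (msg : String) (users : Option (List String)) (out : String) : Prop := out = user_mentions_alt msg users
instance (msg : String) (users : Option (List String)) (out : String) : Decidable (Spec_user_mentions msg users out) := by unfold Spec_user_mentions; infer_instance

-- ===== CLAIM (what is proved, stated in full; the proofs are below) =====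
def Claim_equal_user_mentions : Prop := ∀ (msg : String) (users : Option (List String)), Dom_user_mentions msg users → Spec_user_mentions msg users (user_mentions msg users)

-- ===== LEMMAS AND PROOFS =====

-- Clean recursion computing Python's s.replace(old, new) for nonempty old.
def pvRep (old new : List Char) : List Char → List Char
  | [] => []
  | c :: cs =>
    if List.isPrefixOf old (c :: cs) then new ++ pvRep old new (cs.drop (old.length - 1))
    else c :: pvRep old new cs
termination_by l => l.length
decreasing_by all_goals (simp; try omega)

theorem pvRep_go_eq (old new : List Char) (hold : old ≠ []) :
    ∀ (fuel : Nat) (l acc : List Char), l.length ≤ fuel →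
      PySem.Chars.replace.go old new fuel l acc = acc.reverse ++ pvRep old new l := by
  intro fuel
  induction fuel with
  | zero =>
    intro l acc hl
    have : l = [] := List.length_eq_zero_iff.mp (Nat.le_zero.mp hl)
    subst this
    simp [PySem.Chars.replace.go, pvRep]
  | succ n ih =>
    intro l acc hl
    cases l with
    | nil => simp [PySem.Chars.replace.go, pvRep]
    | cons c cs =>
      rw [PySem.Chars.replace.go]
      simp only [List.length_cons] at hl
      have h1 : 1 ≤ old.length := by
        cases old with
        | nil => exact absurd rfl hold
        | cons _ _ => simp
      by_cases hp : List.isPrefixOf old (c :: cs) = true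
      · have hdrop : List.drop old.length (c :: cs) = cs.drop (old.length - 1) := by
          cases old with
          | nil => exact absurd rfl hold
          | cons o os => simp
        rw [if_pos hp, ih _ _ (by rw [hdrop, List.length_drop]; omega)]
        rw [pvRep, if_pos hp, hdrop]
        simp
      · rw [if_neg hp, ih _ _ (by omega)]
        rw [pvRep, if_neg hp]
        simp

theorem replace_eq_pvRep (s old new : List Char) (hold : old ≠ []) :
    PySem.Chars.replace s old new = pvRep old new s := by
  rw [PySem.Chars.replace]
  have he : old.isEmpty = false := by
    cases old with
    | nil => exact absurd rfl hold
    | cons _ _ => rfl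
  rw [he]
  simpa using pvRep_go_eq old new hold s.length s [] le_rfl

theorem pvRep_of_not_infix (old new : List Char) :
    ∀ s, ¬ old <:+: s → pvRep old new s = s := by
  intro s
  induction s with
  | nil => intro _; rw [pvRep]
  | cons c cs ih =>
    intro h
    have hp : ¬ List.isPrefixOf old (c :: cs) = true := by
      intro hp
      exact h (List.isPrefixOf_iff_prefix.mp hp).isInfix
    have h' : ¬ old <:+: cs := fun hi => h (List.infix_cons hi)
    rw [pvRep, if_neg hp, ih h']

theorem step_eq (old new m : List Char) (hold : old ≠ []) :
    (if PySem.Chars.isIn old m then PySem.Chars.replace m old new else m) = pvRep old new m := by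
  by_cases h : PySem.Chars.isIn old m = true
  · rw [if_pos h]; exact replace_eq_pvRep m old new hold
  · rw [if_neg h]
    exact (pvRep_of_not_infix old new m
      ((PySem.Chars.isIn_eq_false_iff old m).mp (by simpa using h))).symm

-- distribution of pvRep over a left segment inside which no occurrence of old can start
theorem pvRep_append_blocked (old new : List Char) :
    ∀ (u : List Char), (∀ i, i < u.length → ¬ old <+: u.drop i ∧ ¬ u.drop i <+: old) →
      ∀ x, pvRep old new (u ++ x) = u ++ pvRep old new x := by
  intro u
  induction u with
  | nil => intro _ x; simp
  | cons a u' ih =>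
    intro h x
    have hp : ¬ List.isPrefixOf old (a :: (u' ++ x)) = true := by
      intro hp
      have hpre : old <+: (a :: u') ++ x := by simpa using List.isPrefixOf_iff_prefix.mp hp
      rcases List.prefix_or_prefix_of_prefix hpre (List.prefix_append (a :: u') x) with h1 | h2
      · exact (h 0 (by simp)).1 (by simpa using h1)
      · exact (h 0 (by simp)).2 (by simpa using h2)
    show pvRep old new (a :: (u' ++ x)) = (a :: u') ++ pvRep old new x
    rw [pvRep, if_neg hp, ih (fun i hi => by simpa using h (i + 1) (by simpa using hi)) x]
    rfl

theorem pvRep_head (old new s : List Char) (hold : old ≠ []) (hp : old <+: s) :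
    pvRep old new s = new ++ pvRep old new (s.drop old.length) := by
  cases s with
  | nil =>
    cases old with
    | nil => exact absurd rfl hold
    | cons o os => simp at hp
  | cons c cs =>
    rw [pvRep, if_pos (List.isPrefixOf_iff_prefix.mpr hp)]
    have hd : List.drop old.length (c :: cs) = cs.drop (old.length - 1) := by
      cases old with
      | nil => exact absurd rfl hold
      | cons o os => simp
    rw [hd]

theorem pvRep_cons_not_prefix (old new : List Char) (c : Char) (cs : List Char)
    (h : ¬ old <+: (c :: cs)) :
    pvRep old new (c :: cs) = c :: pvRep old new cs := by
  rw [pvRep, if_neg (fun hp => h (List.isPrefixOf_iff_prefix.mp hp))]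

-- replacing old by new neither creates nor destroys a prefix t when every nonempty
-- suffix of t is prefix-incomparable with old and with new
theorem pvRep_prefix_iff (old new : List Char) :
    ∀ (y t : List Char),
      (∀ i, i < t.length →
        (¬ t.drop i <+: old ∧ ¬ old <+: t.drop i) ∧ (¬ t.drop i <+: new ∧ ¬ new <+: t.drop i)) →
      (t <+: pvRep old new y ↔ t <+: y) := by
  intro y
  induction y with
  | nil => intro t _; rw [pvRep]
  | cons c cs ih =>
    intro t hD
    by_cases hp : old <+: (c :: cs)
    · rw [pvRep, if_pos (List.isPrefixOf_iff_prefix.mpr hp)]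
      cases t with
      | nil => simp
      | cons t0 t1 =>
        constructor
        · intro hL
          exfalso
          rcases List.prefix_or_prefix_of_prefix hL
            (List.prefix_append new (pvRep old new (cs.drop (old.length - 1)))) with h1 | h2
          · exact ((hD 0 (by simp)).2.1) (by simpa using h1)
          · exact ((hD 0 (by simp)).2.2) (by simpa using h2)
        · intro hR
          exfalso
          rcases List.prefix_or_prefix_of_prefix hR hp with h1 | h2
          · exact ((hD 0 (by simp)).1.1) (by simpa using h1)
          · exact ((hD 0 (by simp)).1.2) (by simpa using h2)
    · rw [pvRep_cons_not_prefix old new c cs hp]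
      cases t with
      | nil => simp
      | cons t0 t1 =>
        rw [List.cons_prefix_cons, List.cons_prefix_cons,
          ih t1 (fun i hi => by simpa using hD (i + 1) (by simpa using hi))]

-- the three tokens and their wraps, named for brevity
def pvTokA : List Char := "@alix ".toList
def pvTokB : List Char := "@brian ".toList
def pvTokE : List Char := "@evan ".toList
def pvWA : List Char := pvWrapTok pvTokA
def pvWB : List Char := pvWrapTok pvTokB
def pvWE : List Char := pvWrapTok pvTokE

-- A's three replace passes, in A's order
def pvR3 (s : List Char) : List Char := pvRep pvTokE pvWE (pvRep pvTokB pvWB (pvRep pvTokA pvWA s))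

theorem pvMain : ∀ (n : Nat) (s : List Char), s.length ≤ n → pvR3 s = pvScan s := by
  intro n
  induction n with
  | zero =>
    intro s hs
    have : s = [] := List.length_eq_zero_iff.mp (Nat.le_zero.mp hs)
    subst this
    simp [pvR3, pvRep, pvScan]
  | succ n ih =>
    intro s hs
    cases s with
    | nil => simp [pvR3, pvRep, pvScan]
    | cons c cs =>
      simp only [List.length_cons] at hs
      by_cases hA : pvTokA <+: (c :: cs)
      · -- '@alix ' at head
        obtain ⟨t, ht⟩ := hA
        have hlen : 6 + t.length = cs.length + 1 := by
          have h := congrArg List.length ht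
          simp [pvTokA] at h
          omega
        have hdrop : cs.drop 5 = t := by
          have h6 : (pvTokA ++ t).drop 6 = t := by simp [pvTokA]
          rw [ht] at h6
          simpa using h6
        rw [pvScan]
        simp only [show "@alix ".toList = pvTokA from rfl, show "@brian ".toList = pvTokB from rfl, show "@evan ".toList = pvTokE from rfl]
        rw [if_pos (List.isPrefixOf_iff_prefix.mpr ⟨t, ht⟩), hdrop]
        rw [show (c :: cs) = pvTokA ++ t from ht.symm]
        rw [pvR3, pvRep_head pvTokA pvWA _ (by decide) (List.prefix_append _ _), List.drop_left]
        rw [pvRep_append_blocked pvTokB pvWB pvWA (by decide)]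
        rw [pvRep_append_blocked pvTokE pvWE pvWA (by decide)]
        rw [show pvRep pvTokE pvWE (pvRep pvTokB pvWB (pvRep pvTokA pvWA t)) = pvR3 t from rfl]
        rw [ih t (by omega)]
        rfl
      · by_cases hB : pvTokB <+: (c :: cs)
        · -- '@brian ' at head
          obtain ⟨t, ht⟩ := hB
          have hlen : 7 + t.length = cs.length + 1 := by
            have h := congrArg List.length ht
            simp [pvTokB] at h
            omega
          have hdrop : cs.drop 6 = t := by
            have h7 : (pvTokB ++ t).drop 7 = t := by simp [pvTokB]
            rw [ht] at h7
            simpa using h7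
          rw [pvScan]
          simp only [show "@alix ".toList = pvTokA from rfl, show "@brian ".toList = pvTokB from rfl, show "@evan ".toList = pvTokE from rfl]
          rw [if_neg (fun hp => hA (List.isPrefixOf_iff_prefix.mp hp)),
            if_pos (List.isPrefixOf_iff_prefix.mpr ⟨t, ht⟩), hdrop]
          rw [show (c :: cs) = pvTokB ++ t from ht.symm]
          rw [pvR3, pvRep_append_blocked pvTokA pvWA pvTokB (by decide)]
          rw [pvRep_head pvTokB pvWB _ (by decide) (List.prefix_append _ _), List.drop_left]
          rw [pvRep_append_blocked pvTokE pvWE pvWB (by decide)]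
          rw [show pvRep pvTokE pvWE (pvRep pvTokB pvWB (pvRep pvTokA pvWA t)) = pvR3 t from rfl]
          rw [ih t (by omega)]
          rfl
        · by_cases hE : pvTokE <+: (c :: cs)
          · -- '@evan ' at head
            obtain ⟨t, ht⟩ := hE
            have hlen : 6 + t.length = cs.length + 1 := by
              have h := congrArg List.length ht
              simp [pvTokE] at h
              omega
            have hdrop : cs.drop 5 = t := by
              have h6 : (pvTokE ++ t).drop 6 = t := by simp [pvTokE]
              rw [ht] at h6
              simpa using h6
            rw [pvScan]
            simp only [show "@alix ".toList = pvTokA from rfl, show "@brian ".toList = pvTokB from rfl, show "@evan ".toList = pvTokE from rfl]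
            rw [if_neg (fun hp => hA (List.isPrefixOf_iff_prefix.mp hp)),
              if_neg (fun hp => hB (List.isPrefixOf_iff_prefix.mp hp)),
              if_pos (List.isPrefixOf_iff_prefix.mpr ⟨t, ht⟩), hdrop]
            rw [show (c :: cs) = pvTokE ++ t from ht.symm]
            rw [pvR3, pvRep_append_blocked pvTokA pvWA pvTokE (by decide)]
            rw [pvRep_append_blocked pvTokB pvWB pvTokE (by decide)]
            rw [pvRep_head pvTokE pvWE _ (by decide) (List.prefix_append _ _), List.drop_left]
            rw [show pvRep pvTokE pvWE (pvRep pvTokB pvWB (pvRep pvTokA pvWA t)) = pvR3 t from rfl]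
            rw [ih t (by omega)]
            rfl
          · -- no token at head
            rw [pvR3, pvRep_cons_not_prefix pvTokA pvWA c cs hA]
            have hB' : ¬ pvTokB <+: (c :: pvRep pvTokA pvWA cs) := by
              rw [show (c :: pvRep pvTokA pvWA cs) = pvRep pvTokA pvWA (c :: cs) from
                (pvRep_cons_not_prefix pvTokA pvWA c cs hA).symm]
              rw [pvRep_prefix_iff pvTokA pvWA (c :: cs) pvTokB (by decide)]
              exact hB
            rw [pvRep_cons_not_prefix pvTokB pvWB c _ hB']
            have hE' : ¬ pvTokE <+: (c :: pvRep pvTokB pvWB (pvRep pvTokA pvWA cs)) := by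
              rw [show (c :: pvRep pvTokB pvWB (pvRep pvTokA pvWA cs)) =
                  pvRep pvTokB pvWB (pvRep pvTokA pvWA (c :: cs)) from by
                rw [pvRep_cons_not_prefix pvTokA pvWA c cs hA,
                  pvRep_cons_not_prefix pvTokB pvWB c _ hB']]
              rw [pvRep_prefix_iff pvTokB pvWB _ pvTokE (by decide)]
              rw [pvRep_prefix_iff pvTokA pvWA (c :: cs) pvTokE (by decide)]
              exact hE
            rw [pvRep_cons_not_prefix pvTokE pvWE c _ hE']
            rw [show pvRep pvTokE pvWE (pvRep pvTokB pvWB (pvRep pvTokA pvWA cs)) = pvR3 cs from rfl]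
            rw [ih cs (by omega)]
            rw [pvScan]
            simp only [show "@alix ".toList = pvTokA from rfl, show "@brian ".toList = pvTokB from rfl, show "@evan ".toList = pvTokE from rfl]
            rw [if_neg (fun hp => hA (List.isPrefixOf_iff_prefix.mp hp)),
              if_neg (fun hp => hB (List.isPrefixOf_iff_prefix.mp hp)),
              if_neg (fun hp => hE (List.isPrefixOf_iff_prefix.mp hp))]

-- ===== VERDICT (by name: the statement is the Claim_ definition above) =====
theorem user_mentions_spec : Claim_equal_user_mentions := by
  intro msg users _
  unfold Spec_user_mentions user_mentions user_mentions_alt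
  have hm := pvMain msg.toList.length msg.toList le_rfl
  rw [← hm, pvR3]
  simp only [List.foldl]
  rw [step_eq _ _ _ (by decide), step_eq _ _ _ (by decide), step_eq _ _ _ (by decide)]
  rfl
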